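-- pv_equiv track=rewrite | github.com/Akashks2004/VIP-Threat-and-Monitoring | Final_Model.py | interaction_graph
-- ===== SOURCE A (Python) =====
-- from collections import defaultdict
-- from itertools import combinations
--
-- def interaction_graph(posts):
--     edges = defaultdict(set)
--     for p in posts:
--         interactors = set(p.get("likes", []) + p.get("comments", []))
--         for u1,u2 in combinations(interactors,2):
--             edges[u1].add(u2)
--             edges[u2].add(u1)
--     return edges
-- ===== SOURCE B (Python) =====
-- from collections import defaultdict
--
-- def interaction_graph(posts):
--     # pass 1: inverted index user -> the interactor groups (of size >= 2) it belongs to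
--     membership = {}
--     for p in posts:
--         g = set(p.get("likes", []) + p.get("comments", []))
--         if len(g) >= 2:
--             for u in g:
--                 membership[u] = membership.get(u, []) + [g]
--     # pass 2: a user's neighbourhood is the union of its groups, minus itself
--     edges = defaultdict(set)
--     for u, gs in membership.items():
--         edges[u] = set().union(*gs) - {u}
--     return edges
-- ===== Notes on version B (the rewrite author's own statement) =====
-- stated objective: alternative
-- what changed: B replaces A's single pass of per-pair symmetric set.add over combinations(interactors,2) by two staged passes: it first builds an inverted index user -> list of interactor groups (size >= 2) the user appears in, then computes each user's whole neighbourhood at once as the union of its groups minus the user itself; no pair is ever enumerated.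
import Mathlib
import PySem

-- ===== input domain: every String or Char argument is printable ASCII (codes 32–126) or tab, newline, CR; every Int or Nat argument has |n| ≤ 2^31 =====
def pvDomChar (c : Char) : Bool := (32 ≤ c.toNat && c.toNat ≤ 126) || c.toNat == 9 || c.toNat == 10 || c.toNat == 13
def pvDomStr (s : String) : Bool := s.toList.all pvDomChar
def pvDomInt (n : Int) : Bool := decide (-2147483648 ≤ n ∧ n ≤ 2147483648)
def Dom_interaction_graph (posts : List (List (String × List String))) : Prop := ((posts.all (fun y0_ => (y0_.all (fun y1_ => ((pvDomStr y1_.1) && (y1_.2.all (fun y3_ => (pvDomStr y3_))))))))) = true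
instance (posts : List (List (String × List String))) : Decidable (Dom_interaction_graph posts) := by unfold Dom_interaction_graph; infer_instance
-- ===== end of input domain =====

-- B replaces A's per-pair combinations loop by two staged passes: an inverted index
-- user -> groups, then one bulk union per user (same cost, no pair enumeration).
-- Return-value equivalence only: both Pythons return a fresh defaultdict and mutate nothing passed in.

abbrev pvD := PySem.Dict String (PySem.Set String)
abbrev pvM := PySem.Dict String (List (PySem.Set String))

-- shared: set(p.get("likes", []) + p.get("comments", []))  (both Pythons have this exact line)
def pvInteractors (p : List (String × List String)) : PySem.Set String :=
  PySem.Set.ofList ((PySem.Dict.mk p).getD "likes" [] ++ (PySem.Dict.mk p).getD "comments" [])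

-- ===== PORT A =====
-- itertools.combinations(xs, 2) in iteration order
def pvPairs : List String → List (String × String)
  | [] => []
  | x :: rest => rest.map (fun y => (x, y)) ++ pvPairs rest

-- edges[u].add(v) on a defaultdict(set)
def pvAdd (d : pvD) (u v : String) : pvD :=
  d.insert u (PySem.Set.add (d.getD u PySem.Set.empty) v)

def interaction_graph (posts : List (List (String × List String))) : List (String × List String) :=
  (posts.foldl (fun d p =>
      (pvPairs (pvInteractors p)).foldl (fun d uv => pvAdd (pvAdd d uv.1 uv.2) uv.2 uv.1) d)
    PySem.Dict.empty).items

-- ===== PORT B =====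
-- set().union(*gs)
def pvUnionAll (gs : List (PySem.Set String)) : PySem.Set String :=
  gs.foldl (fun s g => PySem.Set.update s g) PySem.Set.empty

-- set().union(*gs) - {u}
def pvVal (u : String) (gs : List (PySem.Set String)) : PySem.Set String :=
  PySem.Set.diff (pvUnionAll gs) (PySem.Set.ofList [u])

-- pass-1 body for one group: for u in g: membership[u] = membership.get(u, []) + [g]
def pvMemStep (m : pvM) (g : PySem.Set String) : pvM :=
  g.foldl (fun m u => m.insert u (m.getD u [] ++ [g])) m

-- pass 2: for u, gs in membership.items(): edges[u] = set().union(*gs) - {u}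
def pvEdgesOf (m : pvM) : pvD :=
  m.items.foldl (fun e ug => e.insert ug.1 (pvVal ug.1 ug.2)) PySem.Dict.empty

def interaction_graph_alt (posts : List (List (String × List String))) : List (String × List String) :=
  (pvEdgesOf (posts.foldl (fun m p =>
      let g := pvInteractors p
      if 2 ≤ g.length then pvMemStep m g else m) PySem.Dict.empty)).items

-- ===== PRECONDITION & SPEC =====
def Spec_interaction_graph (posts : List (List (String × List String))) (out : List (String × List String)) : Prop := out = interaction_graph_alt posts
instance (posts : List (List (String × List String))) (out : List (String × List String)) : Decidable (Spec_interaction_graph posts out) := by unfold Spec_interaction_graph; infer_instance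

-- ===== CLAIM (what is proved, stated in full; the proofs are below) =====
def Claim_equal_interaction_graph : Prop := ∀ (posts : List (List (String × List String))), Dom_interaction_graph posts → Spec_interaction_graph posts (interaction_graph posts)

-- ===== LEMMAS AND PROOFS =====

-- edges[u].update(vs) on a defaultdict(set) (the common normal form of both programs)
def pvUpd (d : pvD) (u : String) (vs : List String) : pvD :=
  d.insert u (PySem.Set.update (d.getD u PySem.Set.empty) vs)

-- Two inserts at distinct keys commute as soon as one of the keys is already present
-- (only then: for two fresh keys the append order would differ).
theorem pv_insert_insert_comm (d : pvD) {u w : String} (v v' : PySem.Set String)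
    (hne : u ≠ w) (hc : d.contains u = true ∨ d.contains w = true) :
    (d.insert u v).insert w v' = (d.insert w v').insert u v := by
  apply PySem.Dict.ext
  by_cases hu : d.contains u = true <;> by_cases hw : d.contains w = true
  · rw [PySem.Dict.items_insert_of_contains (d.insert u v) v'
        (by rw [PySem.Dict.contains_insert]; simp [hw]),
      PySem.Dict.items_insert_of_contains d v hu,
      PySem.Dict.items_insert_of_contains (d.insert w v') v
        (by rw [PySem.Dict.contains_insert]; simp [hu]),
      PySem.Dict.items_insert_of_contains d v' hw]
    simp only [List.map_map]
    apply List.map_congr_left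
    intro p _
    by_cases h1 : p.1 = u <;> by_cases h2 : p.1 = w <;>
      simp_all [Function.comp, Ne.symm hne]
  · have hw' : d.contains w = false := by simpa using hw
    rw [PySem.Dict.items_insert_of_not_contains (d.insert u v) v'
        (by rw [PySem.Dict.contains_insert]; simp [hw', Ne.symm hne]),
      PySem.Dict.items_insert_of_contains d v hu,
      PySem.Dict.items_insert_of_contains (d.insert w v') v
        (by rw [PySem.Dict.contains_insert]; simp [hu]),
      PySem.Dict.items_insert_of_not_contains d v' hw']
    simp [List.map_append, Ne.symm hne]
  · have hu' : d.contains u = false := by simpa using hu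
    rw [PySem.Dict.items_insert_of_contains (d.insert u v) v'
        (by rw [PySem.Dict.contains_insert]; simp [hw]),
      PySem.Dict.items_insert_of_not_contains d v hu',
      PySem.Dict.items_insert_of_not_contains (d.insert w v') v
        (by rw [PySem.Dict.contains_insert]; simp [hu', hne]),
      PySem.Dict.items_insert_of_contains d v' hw]
    simp [List.map_append, hne]
  · tauto

theorem pvAdd_pvAdd_comm (d : pvD) {u w : String} (a b : String)
    (hne : u ≠ w) (hc : d.contains u = true ∨ d.contains w = true) :
    pvAdd (pvAdd d u a) w b = pvAdd (pvAdd d w b) u a := by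
  unfold pvAdd
  rw [PySem.Dict.getD_insert_of_ne _ _ _ (Ne.symm hne), PySem.Dict.getD_insert_of_ne _ _ _ hne]
  exact pv_insert_insert_comm d _ _ hne hc

theorem pvUpd_pvAdd_comm (d : pvD) {u w : String} (a : String) (o : List String)
    (hne : u ≠ w) (hc : d.contains u = true ∨ d.contains w = true) :
    pvUpd (pvAdd d u a) w o = pvAdd (pvUpd d w o) u a := by
  unfold pvAdd pvUpd
  rw [PySem.Dict.getD_insert_of_ne _ _ _ (Ne.symm hne), PySem.Dict.getD_insert_of_ne _ _ _ hne]
  exact pv_insert_insert_comm d _ _ hne hc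

-- accumulating single adds at a fixed key is one bulk update
theorem pv_foldl_pvAdd_insert (x : String) :
    ∀ (vs : List String) (d : pvD) (s : PySem.Set String),
      vs.foldl (fun d v => pvAdd d x v) (d.insert x s) = d.insert x (s.update vs) := by
  intro vs
  induction vs with
  | nil => intro d s; simp [PySem.Set.update_nil]
  | cons v vs ih =>
    intro d s
    have h1 : pvAdd (d.insert x s) x v = d.insert x (s.add v) := by
      unfold pvAdd
      rw [PySem.Dict.getD_insert_self, PySem.Dict.insert_insert_self]
    simp only [List.foldl_cons, h1, ih, PySem.Set.update_cons]

theorem pv_foldl_pvAdd_eq_pvUpd (x r : String) (rs : List String) (d : pvD) :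
    (r :: rs).foldl (fun d v => pvAdd d x v) d = pvUpd d x (r :: rs) := by
  simp only [List.foldl_cons]
  show rs.foldl (fun d v => pvAdd d x v) (d.insert x _) = _
  rw [pv_foldl_pvAdd_insert, pvUpd, PySem.Set.update_cons]

-- re-inserting a present key with its own value is a no-op (keys unique)
theorem pv_insert_getD_self (d : pvD) (u : String)
    (hnd : d.keys.Nodup) (hu : d.contains u = true) :
    d.insert u (d.getD u PySem.Set.empty) = d := by
  apply PySem.Dict.ext
  rw [PySem.Dict.items_insert_of_contains _ _ hu]
  conv_rhs => rw [← List.map_id d.items]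
  apply List.map_congr_left
  intro p hp
  obtain ⟨k, v⟩ := p
  by_cases h : k = u
  · subst h
    have hg := PySem.Dict.get?_of_mem_items d hp hnd
    simp [PySem.Dict.getD, hg]
  · simp [h]

-- pushing one operation h through a foldl of operations it commutes with, under an invariant I
theorem pv_foldl_comm_single (f : String → pvD → pvD) (h : pvD → pvD) (I : pvD → Prop) :
    ∀ (ys : List String) (d : pvD),
      (∀ z ∈ ys, ∀ d, I d → I (f z d)) →
      (∀ z ∈ ys, ∀ d, I d → h (f z d) = f z (h d)) →
      I d →
      h (ys.foldl (fun d z => f z d) d) = ys.foldl (fun d z => f z d) (h d) := by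
  intro ys
  induction ys with
  | nil => intro d _ _ _; simp
  | cons z zs ih =>
    intro d hpres hcomm hI
    simp only [List.foldl_cons]
    rw [ih (f z d) (fun z' hz' => hpres z' (by simp [hz'])) (fun z' hz' => hcomm z' (by simp [hz']))
        (hpres z (by simp) d hI),
      hcomm z (by simp) d hI]

-- interchange: interleaved (f y; g y) per element equals all f's first, then all g's
theorem pv_foldl_interchange (f g : String → pvD → pvD) (I : String → pvD → Prop) :
    ∀ (ys : List String) (d : pvD), ys.Nodup →
      (∀ y ∈ ys, ∀ d, I y (f y d)) →
      (∀ y ∈ ys, ∀ z ∈ ys, ∀ d, I y d → I y (f z d)) →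
      (∀ y ∈ ys, ∀ z ∈ ys, y ≠ z → ∀ d, I y d → g y (f z d) = f z (g y d)) →
      ys.foldl (fun d y => g y (f y d)) d =
        ys.foldl (fun d y => g y d) (ys.foldl (fun d y => f y d) d) := by
  intro ys
  induction ys with
  | nil => intro d _ _ _ _; simp
  | cons y ys ih =>
    intro d hnd hstart hpres hcomm
    have hy : y ∉ ys := (List.nodup_cons.mp hnd).1
    simp only [List.foldl_cons]
    rw [ih (g y (f y d)) (List.nodup_cons.mp hnd).2
        (fun y' hy' => hstart y' (by simp [hy']))
        (fun y' hy' z hz => hpres y' (by simp [hy']) z (by simp [hz]))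
        (fun y' hy' z hz hne => hcomm y' (by simp [hy']) z (by simp [hz]) hne)]
    congr 1
    rw [← pv_foldl_comm_single f (g y) (I y) ys (f y d)
        (fun z hz => hpres y (by simp) z (by simp [hz]))
        (fun z hz d' hI => hcomm y (by simp) z (by simp [hz]) (fun h => hy (h ▸ hz)) d' hI)
        (hstart y (by simp) d)]

-- nodup keys survive any foldl whose step preserves them
theorem pv_foldl_nodup {κ ν β : Type} [BEq κ] (step : PySem.Dict κ ν → β → PySem.Dict κ ν)
    (hstep : ∀ d b, d.keys.Nodup → (step d b).keys.Nodup) :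
    ∀ (l : List β) (d : PySem.Dict κ ν), d.keys.Nodup → (l.foldl step d).keys.Nodup := by
  intro l
  induction l with
  | nil => intro d h; simpa
  | cons b l ih => intro d h; exact ih _ (hstep d b h)

-- A's inner loop over one post's interactor pairs
def pvStepA (d : pvD) (xs : List String) : pvD :=
  (pvPairs xs).foldl (fun d uv => pvAdd (pvAdd d uv.1 uv.2) uv.2 uv.1) d

-- the common normal form: per interactor, one bulk update with all the others
def pvStepS (d : pvD) (xs : List String) : pvD :=
  xs.foldl (fun d u => pvUpd d u (xs.filter (fun a => a != u))) d

theorem pv_core : ∀ (xs : List String) (d : pvD), xs.Nodup → d.keys.Nodup →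
    (xs.length = 1 → ∀ u ∈ xs, d.contains u = true) →
    pvStepA d xs = pvStepS d xs := by
  intro xs
  induction xs with
  | nil => intro d _ _ _; rfl
  | cons x rest ih =>
    intro d hnd hkeys hone
    have hx : x ∉ rest := (List.nodup_cons.mp hnd).1
    have hrest : rest.Nodup := (List.nodup_cons.mp hnd).2
    match rest, hx, hrest, ih with
    | [], _, _, _ =>
      have hcx : d.contains x = true := hone rfl x (by simp)
      show d = pvStepS d [x]
      unfold pvStepS
      show d = pvUpd d x (List.filter (fun a => a != x) [x])
      have hf : List.filter (fun a => a != x) [x] = [] := by simp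
      rw [hf, pvUpd, PySem.Set.update_nil, pv_insert_getD_self d x hkeys hcx]
    | r :: rs, hx, hrest, ih =>
      set rest := r :: rs with hr
      have hxr : ∀ y ∈ rest, y ≠ x := fun y hy h => hx (h ▸ hy)
      -- Step 1: peel off the pairs (x, y), y ∈ rest
      have h1 : pvStepA d (x :: rest) =
          pvStepA (rest.foldl (fun d y => pvAdd (pvAdd d x y) y x) d) rest := by
        unfold pvStepA
        show (List.map (fun y => (x, y)) rest ++ pvPairs rest).foldl _ d = _
        rw [List.foldl_append, List.foldl_map]
      -- Step 2: interchange the x-adds and the y-seeds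
      have h2 : rest.foldl (fun d y => pvAdd (pvAdd d x y) y x) d =
          rest.foldl (fun d y => pvAdd d y x) (rest.foldl (fun d y => pvAdd d x y) d) := by
        exact pv_foldl_interchange (fun y d => pvAdd d x y) (fun y d => pvAdd d y x)
          (fun _ d => d.contains x = true) rest d hrest
          (by intro y _ d; unfold pvAdd; rw [PySem.Dict.contains_insert]; simp)
          (by intro y _ z _ d hI; unfold pvAdd; rw [PySem.Dict.contains_insert]; simp [hI])
          (by
            intro y hy z hz hne d hI
            exact pvAdd_pvAdd_comm d z x (Ne.symm (hxr y hy)) (Or.inl hI))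
      have h3 : rest.foldl (fun d y => pvAdd d x y) d = pvUpd d x rest :=
        pv_foldl_pvAdd_eq_pvUpd x r rs d
      set d1 : pvD := pvUpd d x rest with hd1
      set d2 : pvD := rest.foldl (fun d y => pvAdd d y x) d1 with hd2
      have hnd1 : d1.keys.Nodup := PySem.Dict.nodup_keys_insert _ _ _ hkeys
      have hnd2 : d2.keys.Nodup := by
        rw [hd2]
        exact pv_foldl_nodup _ (fun d b h => PySem.Dict.nodup_keys_insert _ _ _ h) rest d1 hnd1
      have hmem2 : ∀ u ∈ rest, d2.contains u = true := by
        intro u hu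
        rw [hd2]
        have : (rest.foldl (fun d y => d.insert y ((d.getD y PySem.Set.empty).add x)) d1).keys
            = PySem.Set.update d1.keys rest := PySem.Dict.keys_foldl_insert rest _ d1
        rw [PySem.Dict.contains_iff_mem_keys]
        show u ∈ (rest.foldl (fun d y => pvAdd d y x) d1).keys
        unfold pvAdd
        rw [this, PySem.Set.mem_update]
        exact Or.inr hu
      have hIH : pvStepA d2 rest = pvStepS d2 rest :=
        ih d2 hrest hnd2 (fun _ u hu => hmem2 u hu)
      -- Step 5: the spec side decomposes the same way
      have h5 : pvStepS d (x :: rest) = pvStepS d2 rest := by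
        unfold pvStepS
        simp only [List.foldl_cons]
        have hfx : (x :: rest).filter (fun a => a != x) = rest := by
          simp only [List.filter_cons, bne_self_eq_false, if_neg Bool.false_ne_true]
          exact List.filter_eq_self.mpr (fun a ha => by simpa using hxr a ha)
        rw [hfx, ← hd1]
        have hstep : ∀ (dd : pvD), ∀ u ∈ rest,
            pvUpd dd u ((x :: rest).filter (fun a => a != u)) =
              pvUpd (pvAdd dd u x) u (rest.filter (fun a => a != u)) := by
          intro dd u hu
          have : (x :: rest).filter (fun a => a != u) = x :: rest.filter (fun a => a != u) := by
            simp only [List.filter_cons]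
            rw [if_pos (by simpa using Ne.symm (hxr u hu))]
          rw [this, pvUpd, pvUpd, pvAdd, PySem.Dict.getD_insert_self,
            PySem.Dict.insert_insert_self, PySem.Set.update_cons]
        rw [PySem.List.foldl_congr_mem rest _
          (fun dd u => pvUpd (pvAdd dd u x) u (rest.filter (fun a => a != u))) d1
          (fun dd u hu => hstep dd u hu)]
        rw [pv_foldl_interchange (fun u d => pvAdd d u x)
            (fun u d => pvUpd d u (rest.filter (fun a => a != u)))
            (fun u d => d.contains u = true) rest d1 hrest
            (by intro y _ d; unfold pvAdd; rw [PySem.Dict.contains_insert]; simp)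
            (by intro y _ z _ d hI; unfold pvAdd; rw [PySem.Dict.contains_insert]; simp [hI])
            (by
              intro y _ z _ hne d hI
              exact pvUpd_pvAdd_comm d x _ (Ne.symm hne) (Or.inr hI))]
      rw [h1, h2, h3, ← hd2, hIH, h5]

theorem pv_diff_add_ne (s : PySem.Set String) (x u : String) (h : x ≠ u) :
    PySem.Set.diff (PySem.Set.add s x) [u] = PySem.Set.add (PySem.Set.diff s [u]) x := by
  by_cases hx : x ∈ s
  · have h1 : x ∈ PySem.Set.diff s [u] := by
      simp [PySem.Set.diff, List.mem_filter, hx, h]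
    simp [PySem.Set.add, PySem.Set.contains, hx, h1]
  · have h1 : x ∉ PySem.Set.diff s [u] := by
      simp [PySem.Set.diff, List.mem_filter, hx]
    simp [PySem.Set.add, PySem.Set.contains, hx, PySem.Set.diff, List.filter_append, h]

theorem pv_diff_add_self (s : PySem.Set String) (u : String) :
    PySem.Set.diff (PySem.Set.add s u) [u] = PySem.Set.diff s [u] := by
  by_cases hx : u ∈ s <;>
    simp [PySem.Set.add, PySem.Set.contains, hx, PySem.Set.diff, List.filter_append]

theorem pv_diff_update (u : String) :
    ∀ (g : List String) (s : PySem.Set String),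
      PySem.Set.diff (PySem.Set.update s g) (PySem.Set.ofList [u]) =
        PySem.Set.update (PySem.Set.diff s (PySem.Set.ofList [u])) (g.filter (fun a => a != u)) := by
  intro g
  induction g with
  | nil => intro s; rfl
  | cons x g ih =>
    intro s
    have hofl : PySem.Set.ofList [u] = [u] := rfl
    by_cases h : x = u
    · have hf : List.filter (fun a => a != u) (x :: g) = List.filter (fun a => a != u) g := by
        simp [h]
      rw [hf, PySem.Set.update_cons, ih, hofl, h, pv_diff_add_self]
    · have hf : List.filter (fun a => a != u) (x :: g) = x :: List.filter (fun a => a != u) g := by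
        simp [h]
      rw [hf, PySem.Set.update_cons, ih, hofl, pv_diff_add_ne s x u h, PySem.Set.update_cons]

theorem pv_edgesOf_items (m : pvM) (h : m.keys.Nodup) :
    (pvEdgesOf m).items = m.items.map (fun p => (p.1, pvVal p.1 p.2)) := by
  unfold pvEdgesOf
  have := PySem.Dict.items_foldl_insert_fresh m.items (fun p => p.1) (fun p => pvVal p.1 p.2)
    PySem.Dict.empty (fun a _ => PySem.Dict.contains_empty a.1)
    (by simpa [PySem.Dict.keys] using h)
  simpa [PySem.Dict.empty] using this

theorem pv_val_append (u : String) (gs : List (PySem.Set String)) (g : PySem.Set String) :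
    pvVal u (gs ++ [g]) = (pvVal u gs).update (g.filter (fun a => a != u)) := by
  have h1 : pvUnionAll (gs ++ [g]) = PySem.Set.update (pvUnionAll gs) g := by
    unfold pvUnionAll; rw [List.foldl_append]; rfl
  unfold pvVal
  rw [h1, pv_diff_update]

theorem pv_edgesOf_keys (m : pvM) (h : m.keys.Nodup) :
    (pvEdgesOf m).keys = m.keys := by
  simp only [PySem.Dict.keys, pv_edgesOf_items m h, List.map_map]
  rfl

theorem pv_hom (m : pvM) (u : String) (g : PySem.Set String) (h : m.keys.Nodup) :
    pvEdgesOf (m.insert u (m.getD u [] ++ [g])) =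
      pvUpd (pvEdgesOf m) u (g.filter (fun a => a != u)) := by
  apply PySem.Dict.ext
  have hek : (pvEdgesOf m).keys = m.keys := pv_edgesOf_keys m h
  have hekn : (pvEdgesOf m).keys.Nodup := by rw [hek]; exact h
  by_cases hc : m.contains u = true
  · have hce : (pvEdgesOf m).contains u = true := by
      rw [PySem.Dict.contains_iff_mem_keys, hek]
      exact (PySem.Dict.contains_iff_mem_keys m u).mp hc
    rw [pv_edgesOf_items _ (PySem.Dict.nodup_keys_insert m u _ h),
      PySem.Dict.items_insert_of_contains m _ hc,
      pvUpd, PySem.Dict.items_insert_of_contains _ _ hce,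
      pv_edgesOf_items m h]
    simp only [List.map_map]
    apply List.map_congr_left
    intro p hp
    by_cases hpu : p.1 = u
    · have hpv : m.getD u [] = p.2 := by
        have : (u, p.2) ∈ m.items := by rw [← hpu]; exact hp
        exact PySem.Dict.getD_of_mem_items m this h []
      have hev : (pvEdgesOf m).getD u PySem.Set.empty = pvVal u p.2 := by
        have : (u, pvVal u p.2) ∈ (pvEdgesOf m).items := by
          rw [pv_edgesOf_items m h]
          exact List.mem_map.mpr ⟨p, hp, by rw [hpu]⟩
        exact PySem.Dict.getD_of_mem_items _ this hekn _
      simp only [Function.comp, hpu, beq_self_eq_true, if_pos]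
      simp only [hev, hpv, ← pv_val_append]
    · simp [Function.comp, hpu]
  · have hc' : m.contains u = false := by simpa using hc
    have hce : (pvEdgesOf m).contains u = false := by
      have := fun hh => hc ((PySem.Dict.contains_iff_mem_keys m u).mpr
        (hek ▸ (PySem.Dict.contains_iff_mem_keys (pvEdgesOf m) u).mp hh))
      cases hcc : (pvEdgesOf m).contains u
      · rfl
      · exact absurd hcc this
    rw [pv_edgesOf_items _ (PySem.Dict.nodup_keys_insert m u _ h),
      PySem.Dict.items_insert_of_not_contains m _ hc',
      pvUpd, PySem.Dict.items_insert_of_not_contains _ _ hce,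
      pv_edgesOf_items m h, List.map_append,
      PySem.Dict.getD_of_not_contains m [] hc']
    have : pvVal u ([] ++ [g]) = (pvVal u []).update (g.filter (fun a => a != u)) :=
      pv_val_append u [] g
    simp only [List.nil_append] at this
    rw [PySem.Dict.getD_of_not_contains _ PySem.Set.empty hce]
    simp [this]
    rfl

theorem pv_group_aux (g : PySem.Set String) :
    ∀ (l : List String) (m : pvM), m.keys.Nodup →
      pvEdgesOf (l.foldl (fun m u => m.insert u (m.getD u [] ++ [g])) m) =
        l.foldl (fun e u => pvUpd e u (g.filter (fun a => a != u))) (pvEdgesOf m) := by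
  intro l
  induction l with
  | nil => intro m _; rfl
  | cons u l ih =>
    intro m hm
    simp only [List.foldl_cons]
    rw [ih _ (PySem.Dict.nodup_keys_insert m u _ hm), pv_hom m u g hm]

theorem pv_group (g : PySem.Set String) (m : pvM) (hm : m.keys.Nodup) :
    pvEdgesOf (pvMemStep m g) = pvStepS (pvEdgesOf m) g :=
  pv_group_aux g g m hm

theorem pv_memstep_nodup (m : pvM) (g : PySem.Set String) (hm : m.keys.Nodup) :
    (pvMemStep m g).keys.Nodup :=
  pv_foldl_nodup _ (fun d b h => PySem.Dict.nodup_keys_insert d b _ h) g m hm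

theorem pv_main (gs : List (PySem.Set String)) :
    pvEdgesOf (gs.foldl pvMemStep PySem.Dict.empty) = gs.foldl pvStepS PySem.Dict.empty := by
  induction gs using List.reverseRecOn with
  | nil => rfl
  | append_singleton gs g ih =>
    rw [List.foldl_append, List.foldl_append]
    simp only [List.foldl_cons, List.foldl_nil]
    rw [pv_group g _ (pv_foldl_nodup pvMemStep
        (fun d b h => pv_memstep_nodup d b h) gs PySem.Dict.empty (by simp [PySem.Dict.empty, PySem.Dict.keys])), ih]

theorem pv_stepA_short (d : pvD) (xs : List String) (h : xs.length < 2) : pvStepA d xs = d := by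
  match xs, h with
  | [], _ => rfl
  | [x], _ => rfl
  | x :: y :: t, h => simp [List.length_cons] at h

theorem pv_stepS_nodup (d : pvD) (xs : List String) (h : d.keys.Nodup) :
    (pvStepS d xs).keys.Nodup :=
  pv_foldl_nodup _
    (fun d b hb => by unfold pvUpd; exact PySem.Dict.nodup_keys_insert _ _ _ hb) xs d h

-- A's whole fold is the filtered normal-form fold
theorem pv_a_norm :
    ∀ (posts : List (List (String × List String))) (d : pvD), d.keys.Nodup →
      posts.foldl (fun d p =>
          (pvPairs (pvInteractors p)).foldl (fun d uv => pvAdd (pvAdd d uv.1 uv.2) uv.2 uv.1) d) d =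
        (((posts.map pvInteractors).filter (fun g => 2 ≤ g.length)).foldl pvStepS d) := by
  intro posts
  induction posts with
  | nil => intro d _; rfl
  | cons p ps ih =>
    intro d hd
    simp only [List.foldl_cons, List.map_cons, List.filter_cons]
    by_cases hg : 2 ≤ (pvInteractors p).length
    · rw [if_pos (by simpa using hg)]
      simp only [List.foldl_cons]
      have hA : pvStepA d (pvInteractors p) = pvStepS d (pvInteractors p) :=
        pv_core _ d (PySem.Set.nodup_ofList _) hd (fun h1 => by omega)
      show ps.foldl _ (pvStepA d (pvInteractors p)) = _
      rw [hA]
      exact ih _ (pv_stepS_nodup d _ hd)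
    · rw [if_neg (by simpa using hg)]
      have hA : pvStepA d (pvInteractors p) = d := pv_stepA_short d _ (by omega)
      show ps.foldl _ (pvStepA d (pvInteractors p)) = _
      rw [hA]
      exact ih d hd

-- B's pass 1 is the filtered membership fold
theorem pv_b_norm (posts : List (List (String × List String))) :
    posts.foldl (fun m p =>
        let g := pvInteractors p
        if 2 ≤ g.length then pvMemStep m g else m) PySem.Dict.empty =
      ((posts.map pvInteractors).filter (fun g => 2 ≤ g.length)).foldl pvMemStep PySem.Dict.empty := by
  show posts.foldl (fun m p =>
      if 2 ≤ (pvInteractors p).length then pvMemStep m (pvInteractors p) else m)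
      PySem.Dict.empty = _
  rw [← List.foldl_map (f := pvInteractors)
      (g := fun m g => if 2 ≤ g.length then pvMemStep m g else m),
    PySem.List.foldl_ite_eq_foldl_filter (p := fun g : PySem.Set String => 2 ≤ g.length)]

-- ===== VERDICT (by name: the statement is the Claim_ definition above) =====
theorem interaction_graph_spec : Claim_equal_interaction_graph := by
  intro posts _
  show interaction_graph posts = interaction_graph_alt posts
  unfold interaction_graph interaction_graph_alt
  rw [pv_a_norm posts PySem.Dict.empty (by simp [PySem.Dict.empty, PySem.Dict.keys]),
    pv_b_norm, pv_main]
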